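-- pv_equiv track=rewrite | github.com/osk/maltaekni-v2 | wordstats.py | count_word_forms
-- ===== SOURCE A (Python) =====
-- def count_word_forms(input_str_list: list):
--     """Count different word forms in input_str"""
--     count = 0
--     seen = set()
--     for word in input_str_list:
--         word = word.lower()
--         if word not in seen:
--             count = count + 1
--         seen.add(word)
--     return count
-- ===== SOURCE B (Python) =====
-- def count_word_forms(input_str_list: list):
--     """Count different word forms in input_str"""
--     ws = sorted(w.lower() for w in input_str_list)
--     if not ws:
--         return 0
--     count = 1
--     prev = ws[0]
--     for cur in ws[1:]:
--         if cur != prev: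
--             count = count + 1
--         prev = cur
--     return count
-- ===== Notes on version B (the rewrite author's own statement) =====
-- stated objective: alternative
-- what changed: Replaces the hash-set membership loop by sort-then-scan: sort the lowercased words and count positions where an element differs from its predecessor.
import Mathlib
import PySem

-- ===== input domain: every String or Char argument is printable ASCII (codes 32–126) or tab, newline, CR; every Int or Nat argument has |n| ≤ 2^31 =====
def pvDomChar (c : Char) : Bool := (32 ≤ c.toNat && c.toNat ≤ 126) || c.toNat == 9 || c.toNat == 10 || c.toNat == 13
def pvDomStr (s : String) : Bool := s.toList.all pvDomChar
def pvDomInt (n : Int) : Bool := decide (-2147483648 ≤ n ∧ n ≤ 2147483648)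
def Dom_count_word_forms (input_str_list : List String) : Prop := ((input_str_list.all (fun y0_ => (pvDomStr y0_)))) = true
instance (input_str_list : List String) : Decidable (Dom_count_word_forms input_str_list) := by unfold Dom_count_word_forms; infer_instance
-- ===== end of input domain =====

-- B replaces A's hash-set membership loop by sort-then-scan over adjacent duplicates (alternative decomposition, same result).

-- ===== PORT A =====
def count_word_forms (input_str_list : List String) : Int :=
  (input_str_list.foldl
    (fun (st : Int × PySem.Set String) w =>
      let word := PySem.Str.lower w
      let count := if PySem.Set.contains st.2 word then st.1 else st.1 + 1
      (count, PySem.Set.add st.2 word))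
    (0, PySem.Set.empty)).1

-- ===== PORT B =====
def count_word_forms_alt (input_str_list : List String) : Int :=
  let ws := PySem.List.sorted (input_str_list.map PySem.Str.lower) (fun x => x) false
  match ws with
  | [] => 0
  | h :: t =>
    (t.foldl (fun (st : Int × String) cur =>
        (if cur ≠ st.2 then st.1 + 1 else st.1, cur)) (1, h)).1

-- ===== PRECONDITION & SPEC =====
def Spec_count_word_forms (input_str_list : List String) (out : Int) : Prop := out = count_word_forms_alt input_str_list
instance (input_str_list : List String) (out : Int) : Decidable (Spec_count_word_forms input_str_list out) := by unfold Spec_count_word_forms; infer_instance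

-- ===== CLAIM (what is proved, stated in full; the proofs are below) =====
def Claim_equal_count_word_forms : Prop := ∀ (input_str_list : List String), Dom_count_word_forms input_str_list → Spec_count_word_forms input_str_list (count_word_forms input_str_list)

-- ===== LEMMAS AND PROOFS =====

-- A's loop: final state = (count + number of new distinct lowered words, seen ∪ lowered words).
lemma a_fold_eq (l : List String) : ∀ (c : Int) (s : PySem.Set String),
    (l.foldl
      (fun (st : Int × PySem.Set String) w =>
        let word := PySem.Str.lower w
        let count := if PySem.Set.contains st.2 word then st.1 else st.1 + 1
        (count, PySem.Set.add st.2 word)) (c, s))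
    = (c + ((PySem.Set.update s (l.map PySem.Str.lower)).length : Int) - (s.length : Int),
       PySem.Set.update s (l.map PySem.Str.lower)) := by
  induction l with
  | nil => intro c s; simp [PySem.Set.update]
  | cons x l ih =>
    intro c s
    have hcons : PySem.Set.update s (PySem.Str.lower x :: l.map PySem.Str.lower)
        = PySem.Set.update (PySem.Set.add s (PySem.Str.lower x)) (l.map PySem.Str.lower) :=
      PySem.Set.update_cons _ _ _
    by_cases hmem : PySem.Str.lower x ∈ s
    · have hc : PySem.Set.contains s (PySem.Str.lower x) = true :=
        (PySem.Set.contains_iff _ _).2 hmem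
      have hadd : PySem.Set.add s (PySem.Str.lower x) = s := PySem.Set.add_of_mem hmem
      simp only [List.map_cons, List.foldl_cons, hc, hadd, ih, hcons]
      simp
    · have hc : PySem.Set.contains s (PySem.Str.lower x) = false := by
        by_contra h
        exact hmem ((PySem.Set.contains_iff _ _).1 (by simpa using h))
      have hadd : PySem.Set.add s (PySem.Str.lower x) = s ++ [PySem.Str.lower x] :=
        PySem.Set.add_of_not_mem hmem
      simp only [List.map_cons, List.foldl_cons, hc, ih, hcons, Prod.mk.injEq, and_true]
      rw [hadd]
      simp only [List.length_append, List.length_cons, List.length_nil,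
        Bool.false_eq_true, if_false]
      push_cast
      ring

-- Nodup lists with the same members have equal length.
lemma length_eq_of_nodup_same_mem {α : Type} (s t : List α) (hs : s.Nodup) (ht : t.Nodup)
    (h : ∀ x, x ∈ s ↔ x ∈ t) : s.length = t.length :=
  ((List.perm_ext_iff_of_nodup hs ht).2 h).length_eq

-- |set(a :: l)| = |set l|, plus one iff a is fresh.
lemma length_ofList_cons (a : String) (l : List String) :
    (PySem.Set.ofList (a :: l)).length
      = (if a ∈ l then (PySem.Set.ofList l).length else (PySem.Set.ofList l).length + 1) := by
  rw [PySem.Set.ofList_cons]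
  have hnd : (a :: PySem.Set.discard (PySem.Set.ofList l) a).Nodup := by
    refine List.nodup_cons.2 ⟨?_, PySem.Set.nodup_discard _ a (PySem.Set.nodup_ofList l)⟩
    intro hcon
    exact ((PySem.Set.mem_discard _ _ _).1 hcon).2 rfl
  by_cases hmem : a ∈ l
  · rw [if_pos hmem]
    apply length_eq_of_nodup_same_mem _ _ hnd (PySem.Set.nodup_ofList l)
    intro x
    constructor
    · intro hx
      rcases List.mem_cons.1 hx with h | h
      · exact h ▸ (PySem.Set.mem_ofList _ _).2 hmem
      · exact ((PySem.Set.mem_discard _ _ _).1 h).1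
    · intro hx
      by_cases hxa : x = a
      · exact hxa ▸ List.mem_cons_self
      · exact List.mem_cons.2 (Or.inr ((PySem.Set.mem_discard _ _ _).2 ⟨hx, hxa⟩))
  · rw [if_neg hmem]
    have : (a :: PySem.Set.discard (PySem.Set.ofList l) a).length
        = (a :: PySem.Set.ofList l).length := by
      apply length_eq_of_nodup_same_mem _ _ hnd
      · refine List.nodup_cons.2 ⟨?_, PySem.Set.nodup_ofList l⟩
        intro hcon
        exact hmem ((PySem.Set.mem_ofList _ _).1 hcon)
      · intro x
        constructor
        · intro hx
          rcases List.mem_cons.1 hx with h | h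
          · exact h ▸ List.mem_cons_self
          · exact List.mem_cons.2 (Or.inr ((PySem.Set.mem_discard _ _ _).1 h).1)
        · intro hx
          rcases List.mem_cons.1 hx with h | h
          · exact h ▸ List.mem_cons_self
          · refine List.mem_cons.2 (Or.inr ((PySem.Set.mem_discard _ _ _).2 ⟨h, ?_⟩))
            intro hxa
            exact hmem ((PySem.Set.mem_ofList _ _).1 (hxa ▸ h))
    simpa using this

-- B's scan over a weakly-sorted list counts its distinct elements.
lemma b_scan_eq (t : List String) : ∀ (prev : String) (c : Int),
    (prev :: t).Pairwise (· ≤ ·) →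
    ((t.foldl (fun (st : Int × String) cur =>
        (if cur ≠ st.2 then st.1 + 1 else st.1, cur)) (c, prev)).1 : Int)
      = c + ((PySem.Set.ofList (prev :: t)).length : Int) - 1 := by
  induction t with
  | nil =>
    intro prev c _
    simp [PySem.Set.ofList]
  | cons x t ih =>
    intro prev c h
    have htail : (x :: t).Pairwise (· ≤ ·) := h.of_cons
    have hlen := length_ofList_cons prev (x :: t)
    by_cases hxp : x = prev
    · have hmem : prev ∈ x :: t := by rw [hxp]; exact List.mem_cons_self
      rw [hlen, if_pos hmem]
      simp only [List.foldl_cons]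
      rw [if_neg (show ¬ x ≠ prev by simp [hxp])]
      exact ih x c htail
    · have hmem : prev ∉ x :: t := by
        intro hmem
        rcases List.mem_cons.1 hmem with hh | hh
        · exact hxp hh.symm
        · have h1 : prev ≤ x := (List.pairwise_cons.1 h).1 x List.mem_cons_self
          have h2 : x ≤ prev := (List.pairwise_cons.1 htail).1 prev hh
          exact hxp (le_antisymm h2 h1)
      rw [hlen, if_neg hmem]
      simp only [List.foldl_cons]
      rw [if_pos hxp, ih x (c + 1) htail]
      push_cast
      ring
  
-- ===== VERDICT (by name: the statement is the Claim_ definition above) =====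
theorem count_word_forms_spec : Claim_equal_count_word_forms := by
  intro xs _
  unfold Spec_count_word_forms count_word_forms count_word_forms_alt
  rw [a_fold_eq xs 0 PySem.Set.empty]
  have hupd : PySem.Set.update PySem.Set.empty (xs.map PySem.Str.lower)
      = PySem.Set.ofList (xs.map PySem.Str.lower) := PySem.Set.update_nil_left _
  rw [hupd]
  simp only [PySem.Set.empty, List.length_nil, Nat.cast_zero, sub_zero, zero_add]
  rcases hz : PySem.List.sorted (xs.map PySem.Str.lower) (fun x => x) false with _ | ⟨h, t⟩
  · have : xs.map PySem.Str.lower = [] := (PySem.List.sorted_eq_nil_iff _ _ _).1 hz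
    simp [this, PySem.Set.ofList]
  · have hpw : (h :: t).Pairwise (· ≤ ·) := by
      have := PySem.List.sorted_pairwise (xs := xs.map PySem.Str.lower) (key := fun x => x)
      rw [hz] at this
      simpa using this
    have hperm : (h :: t).Perm (xs.map PySem.Str.lower) := by
      have := PySem.List.sorted_perm (xs := xs.map PySem.Str.lower) (key := fun x => x) (rev := false)
      rw [hz] at this
      exact this
    have hlen : (PySem.Set.ofList (h :: t)).length
        = (PySem.Set.ofList (xs.map PySem.Str.lower)).length := by
      apply length_eq_of_nodup_same_mem _ _ (PySem.Set.nodup_ofList _) (PySem.Set.nodup_ofList _)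
      intro x
      simp only [PySem.Set.mem_ofList]
      exact ⟨fun hx => hperm.mem_iff.1 hx, fun hx => hperm.mem_iff.2 hx⟩
    have hmatch : (match h :: t with
        | [] => (0 : Int)
        | h :: t => (t.foldl (fun (st : Int × String) cur =>
            (if cur ≠ st.2 then st.1 + 1 else st.1, cur)) (1, h)).1)
        = (t.foldl (fun (st : Int × String) cur =>
            (if cur ≠ st.2 then st.1 + 1 else st.1, cur)) (1, h)).1 := rfl
    rw [hmatch, b_scan_eq t h 1 hpw, hlen]
    ring
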